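-- pv_equiv track=rewrite | github.com/miliar/Code_Jam_Webscraper | solutions_python/Problem_155/631.py | solve
-- ===== SOURCE A (Python) =====
-- def solve(p):
--     A = p
--
--     numNeed = 0
--     t = 0
--     for i in range(len(A)):
--         if t < i:
--             numNeed += i-t
--             t = i
--
--         t += A[i]
--
--     return numNeed
-- ===== SOURCE B (Python) =====
-- def solve(p):
--     # pass 1: prefix-sum table, prefixes[i] == sum(p[:i])
--     prefixes = [0]
--     s = 0
--     for x in p:
--         s += x
--         prefixes.append(s)
--     # pass 2: max-reduction over the table
--     return max((i - prefixes[i] for i in range(len(p))), default=0)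
-- ===== Notes on version B (the rewrite author's own statement) =====
-- stated objective: alternative
-- what changed: Replaces A's incremental simulation of the running total t with a closed-form two-pass computation: build the prefix-sum table, then take max(i - prefixes[i], default=0).
import Mathlib
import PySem

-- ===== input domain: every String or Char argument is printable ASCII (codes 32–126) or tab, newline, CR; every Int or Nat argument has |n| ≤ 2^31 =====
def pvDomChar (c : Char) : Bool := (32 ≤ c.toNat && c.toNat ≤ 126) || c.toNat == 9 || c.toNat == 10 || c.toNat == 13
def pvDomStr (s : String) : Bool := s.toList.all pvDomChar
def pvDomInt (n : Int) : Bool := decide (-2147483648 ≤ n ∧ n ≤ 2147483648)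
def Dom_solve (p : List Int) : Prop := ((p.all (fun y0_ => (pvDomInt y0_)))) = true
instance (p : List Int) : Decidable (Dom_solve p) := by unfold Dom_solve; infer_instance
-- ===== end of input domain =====

-- B replaces A's incremental simulation of t by two passes (prefix-sum table, then max-reduction); same cost, different decomposition.

-- ===== PORT A =====
def solve (p : List Int) : Int :=
  ((PySem.List.pyRange 0 (p.length : Int) 1).foldl (fun (st : Int × Int) i =>
      let numNeed := st.1
      let t := st.2
      let (numNeed, t) := if t < i then (numNeed + (i - t), i) else (numNeed, t)
      (numNeed, t + PySem.List.pyGetD p i 0)) ((0 : Int), (0 : Int))).1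

-- ===== PORT B =====
def solve_alt (p : List Int) : Int :=
  let prefixes := (p.foldl (fun (st : List Int × Int) x => (st.1 ++ [st.2 + x], st.2 + x)) ([(0 : Int)], (0 : Int))).1
  let vals := (PySem.List.pyRange 0 (p.length : Int) 1).map (fun i => i - PySem.List.pyGetD prefixes i 0)
  (PySem.List.max? vals (fun y => y)).getD 0

-- ===== PRECONDITION & SPEC =====
def Spec_solve (p : List Int) (out : Int) : Prop := out = solve_alt p
instance (p : List Int) (out : Int) : Decidable (Spec_solve p out) := by unfold Spec_solve; infer_instance

-- ===== CLAIM (what is proved, stated in full; the proofs are below) =====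
def Claim_equal_solve : Prop := ∀ (p : List Int), Dom_solve p → Spec_solve p (solve p)

-- ===== LEMMAS AND PROOFS =====

/-- sum of the first `n` entries of `p` -/
def sTake (p : List Int) (n : Nat) : Int := (p.take n).sum

/-- the common value: running max of `i - sum(p[:i])` over `i < n`, starting at 0 -/
def Mv (p : List Int) (n : Nat) : Int :=
  ((List.range n).map (fun (i : Nat) => (i : Int) - sTake p i)).foldl max 0

lemma sTake_succ (p : List Int) (n : Nat) (h : n < p.length) :
    sTake p (n + 1) = sTake p n + p[n] := by
  simpa [sTake] using List.sum_take_succ p n h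

lemma Mv_succ (p : List Int) (n : Nat) :
    Mv p (n + 1) = max (Mv p n) ((n : Int) - sTake p n) := by
  simp [Mv, List.range_succ]

lemma solve_inv (p : List Int) (n : Nat) (h : n ≤ p.length) :
    (PySem.List.pyRange 0 (n : Int) 1).foldl (fun (st : Int × Int) i =>
      let numNeed := st.1
      let t := st.2
      let (numNeed, t) := if t < i then (numNeed + (i - t), i) else (numNeed, t)
      (numNeed, t + PySem.List.pyGetD p i 0)) ((0 : Int), (0 : Int))
    = (Mv p n, sTake p n + Mv p n) := by
  induction n with
  | zero => simp [Mv, sTake]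
  | succ k ih =>
    have hk : k < p.length := h
    have hr : PySem.List.pyRange 0 ((k : Int) + 1) 1
        = PySem.List.pyRange 0 (k : Int) 1 ++ [(k : Int)] :=
      PySem.List.pyRange_one_succ_right (by positivity)
    have hget : PySem.List.pyGetD p (k : Int) 0 = p[k] := by
      rw [PySem.List.pyGetD_natCast]
      simp [List.getD, List.getElem?_eq_getElem hk]
    push_cast [hr]
    rw [List.foldl_append, ih (le_of_lt hk)]
    simp only [List.foldl_cons, List.foldl_nil, hget]
    rw [Mv_succ, sTake_succ p k hk]
    split_ifs with hlt
    · have : max (Mv p k) ((k : Int) - sTake p k) = (k : Int) - sTake p k := by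
        rw [max_eq_right]; omega
      simp only [this, Prod.mk.injEq]; constructor <;> ring
    · have : max (Mv p k) ((k : Int) - sTake p k) = Mv p k := by
        rw [max_eq_left]; omega
      simp only [this, Prod.mk.injEq]
      exact ⟨trivial, by ring⟩

lemma solve_eq_Mv (p : List Int) : solve p = Mv p p.length := by
  rw [solve, solve_inv p p.length le_rfl]

lemma prefixes_fold (p : List Int) : ∀ (acc : List Int) (s : Int),
    p.foldl (fun (st : List Int × Int) x => (st.1 ++ [st.2 + x], st.2 + x)) (acc, s)
    = (acc ++ (List.range p.length).map (fun i => s + (p.take (i + 1)).sum), s + p.sum) := by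
  induction p with
  | nil => intro acc s; simp
  | cons x t ih =>
    intro acc s
    simp only [List.foldl_cons, ih, List.length_cons, List.range_succ_eq_map,
      List.map_cons, List.map_map, List.sum_cons, Prod.mk.injEq]
    refine ⟨?_, by ring⟩
    rw [List.append_assoc]
    congr 1
    simp [Function.comp, List.take_succ_cons]
    intro _ _
    ring

lemma prefixes_getD (p : List Int) (i : Nat) (hi : i ≤ p.length) :
    PySem.List.pyGetD
      ((p.foldl (fun (st : List Int × Int) x => (st.1 ++ [st.2 + x], st.2 + x)) ([(0 : Int)], (0 : Int))).1)
      (i : Int) 0 = sTake p i := by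
  rw [prefixes_fold p [(0 : Int)] 0, PySem.List.pyGetD_natCast]
  cases i with
  | zero => simp [sTake]
  | succ j =>
    have hj : j < p.length := hi
    simp only [List.singleton_append, List.getD, List.getElem?_cons_succ]
    rw [List.getElem?_map, List.getElem?_range hj]
    simp [sTake]

lemma solve_alt_eq_Mv (p : List Int) : solve_alt p = Mv p p.length := by
  rw [solve_alt]
  have hvals : (PySem.List.pyRange 0 (p.length : Int) 1).map
      (fun i => i - PySem.List.pyGetD
        ((p.foldl (fun (st : List Int × Int) x => (st.1 ++ [st.2 + x], st.2 + x)) ([(0 : Int)], (0 : Int))).1) i 0)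
      = (List.range p.length).map (fun (i : Nat) => (i : Int) - sTake p i) := by
    rw [PySem.List.pyRange_zero_natCast, List.map_map]
    refine List.map_congr_left ?_
    intro i hi
    simp only [Function.comp]
    rw [prefixes_getD p i (le_of_lt (List.mem_range.mp hi))]
  simp only [hvals]
  rcases hp : p.length with _ | k
  · simp [Mv, PySem.List.max?]
  · rw [List.range_succ_eq_map]
    simp only [List.map_cons, List.map_map]
    rw [PySem.List.max?_id_cons]
    simp only [Option.getD_some, Mv, List.range_succ_eq_map, List.map_cons,
      List.map_map, List.foldl_cons]
    have h0 : sTake p 0 = 0 := rfl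
    simp [h0]

-- ===== VERDICT (by name: the statement is the Claim_ definition above) =====
theorem solve_spec : Claim_equal_solve := by
  intro p _
  unfold Spec_solve
  rw [solve_eq_Mv, solve_alt_eq_Mv]
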